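-- pv_equiv track=rewrite | github.com/whiteshark05/Competitive-Programming | Codeforce/Div 1 + Div 2/Goodbye 2022/C2.py | can_make_coprime
-- ===== SOURCE A (Python) =====
-- from math import gcd
--
-- def can_make_coprime(a):
--   n = len(a)
--   g = a[0]
--   for i in range(1, n):
--     g = gcd(g, a[i])
--   if g == 1:
--     return "YES"
--   for i in range(n):
--     for j in range(i+1, n):
--       if gcd(a[i]+g, a[j]+g) != 1:
--         return "NO"
--   return "YES"
-- ===== SOURCE B (Python) =====
-- from math import gcd
--
-- def can_make_coprime(a):
--     g = a[0]
--     for x in a[1:]: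
--         g = gcd(g, x)
--     if g == 1:
--         return "YES"
--     # pairwise coprimality of the shifted values via a running product:
--     # x+g is coprime to all earlier values iff it is coprime to their product.
--     prod = 1
--     for x in a:
--         if gcd(x + g, prod) != 1:
--             return "NO"
--         prod *= x + g
--     return "YES"
-- ===== Notes on version B (the rewrite author's own statement) =====
-- stated objective: alternative
-- what changed: B replaces A's nested pairwise-gcd double loop by a single pass keeping a running product of the shifted values: each x+g is coprime to all earlier values iff it is coprime to their product.
import Mathlib
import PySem

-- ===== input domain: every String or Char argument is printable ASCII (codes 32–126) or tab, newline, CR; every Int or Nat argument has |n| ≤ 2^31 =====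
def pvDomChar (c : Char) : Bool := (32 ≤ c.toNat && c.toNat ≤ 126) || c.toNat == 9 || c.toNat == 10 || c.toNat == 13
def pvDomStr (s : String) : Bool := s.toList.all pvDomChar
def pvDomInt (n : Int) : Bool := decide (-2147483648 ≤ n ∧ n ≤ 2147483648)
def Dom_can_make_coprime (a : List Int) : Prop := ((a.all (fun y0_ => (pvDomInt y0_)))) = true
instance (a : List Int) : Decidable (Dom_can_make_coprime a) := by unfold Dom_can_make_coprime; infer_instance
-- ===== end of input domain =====

-- B replaces the nested pairwise-gcd scan by one pass with a running product of the
-- shifted values (coprime to all earlier values iff coprime to their product).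

-- ===== PORT A =====
def can_make_coprime (a : List Int) : String :=
  let n : Int := a.length
  let g : Int :=
    (PySem.List.pyRange 1 n 1).foldl
      (fun g i => (Int.gcd g (PySem.List.pyGetD a i 0) : Int))
      (PySem.List.pyGetD a 0 0)
  if g = 1 then "YES"
  else if (PySem.List.pyRange 0 n 1).any (fun i =>
            (PySem.List.pyRange (i+1) n 1).any (fun j =>
              (Int.gcd (PySem.List.pyGetD a i 0 + g) (PySem.List.pyGetD a j 0 + g) : Int) ≠ 1))
  then "NO" else "YES"

-- ===== PORT B =====
-- the 'for x in a' loop with the early return and the running-product accumulator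
def pvProdScan (g : Int) : List Int → Int → String
  | [], _ => "YES"
  | x :: xs, prod =>
    if (Int.gcd (x + g) prod : Int) ≠ 1 then "NO"
    else pvProdScan g xs (prod * (x + g))

def can_make_coprime_alt (a : List Int) : String :=
  let g : Int := (a.drop 1).foldl (fun g x => (Int.gcd g x : Int)) (PySem.List.pyGetD a 0 0)
  if g = 1 then "YES" else pvProdScan g a 1

-- ===== PRECONDITION & SPEC =====
-- Pre_ excludes only the empty list, on which both A and B raise IndexError at the initial first-element access.
def Pre_can_make_coprime (a : List Int) : Prop := a ≠ []
instance (a : List Int) : Decidable (Pre_can_make_coprime a) := by unfold Pre_can_make_coprime; infer_instance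
def pvWitness_can_make_coprime : List Int := ([2, 4])

def Spec_can_make_coprime (a : List Int) (out : String) : Prop := out = can_make_coprime_alt a
instance (a : List Int) (out : String) : Decidable (Spec_can_make_coprime a out) := by unfold Spec_can_make_coprime; infer_instance

-- ===== CLAIM (what is proved, stated in full; the proofs are below) =====
def Claim_equal_can_make_coprime : Prop := ∀ (a : List Int), Dom_can_make_coprime a → Pre_can_make_coprime a → Spec_can_make_coprime a (can_make_coprime a)

-- ===== LEMMAS AND PROOFS =====

-- gcd distributes over a product on the right (Python's nonnegative gcd, on Int)
theorem pv_gcd_mul_right (y p x : Int) :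
    Int.gcd y (p * x) = 1 ↔ Int.gcd y p = 1 ∧ Int.gcd y x = 1 := by
  unfold Int.gcd
  rw [Int.natAbs_mul]
  exact Nat.coprime_mul_iff_right

-- the running-product scan answers "YES" iff every element is coprime to the seed
-- and the (shifted) list is pairwise coprime
theorem pvProdScan_yes_iff (g : Int) (l : List Int) (P : Int) :
    pvProdScan g l P = "YES" ↔
      ((∀ x ∈ l, Int.gcd (x + g) P = 1) ∧
       l.Pairwise (fun x y => Int.gcd (x + g) (y + g) = 1)) := by
  induction l generalizing P with
  | nil => simp [pvProdScan]
  | cons x xs ih =>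
    simp only [pvProdScan]
    by_cases h : (Int.gcd (x + g) P : Int) = 1
    · rw [if_neg (not_not_intro h), ih]
      have hN : Int.gcd (x + g) P = 1 := by exact_mod_cast h
      simp only [List.mem_cons, List.pairwise_cons]
      constructor
      · rintro ⟨h1, h2⟩
        refine ⟨?_, fun y hy => ?_, h2⟩
        · rintro y (rfl | hy)
          · exact hN
          · exact ((pv_gcd_mul_right _ _ _).1 (h1 y hy)).1
        · have := ((pv_gcd_mul_right _ _ _).1 (h1 y hy)).2
          rw [Int.gcd_comm]; exact this
      · rintro ⟨h1, h2, h3⟩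
        refine ⟨fun y hy => ?_, h3⟩
        exact (pv_gcd_mul_right _ _ _).2
          ⟨h1 y (Or.inr hy), by rw [Int.gcd_comm]; exact h2 y hy⟩
    · rw [if_pos h]
      constructor
      · intro hc; exact absurd hc (by decide)
      · rintro ⟨h1, -⟩
        exact absurd (h1 x List.mem_cons_self) (fun hh => h (by exact_mod_cast hh))

theorem pvProdScan_yes_or_no (g : Int) (l : List Int) (P : Int) :
    pvProdScan g l P = "YES" ∨ pvProdScan g l P = "NO" := by
  induction l generalizing P with
  | nil => left; rfl
  | cons x xs ih =>
    simp only [pvProdScan]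
    split
    · right; rfl
    · exact ih _

-- A's nested any-loops come out false exactly when the shifted list is pairwise coprime
theorem pv_any_false_iff (a : List Int) (g : Int) :
    (((PySem.List.pyRange 0 (a.length : Int) 1).any (fun i =>
        (PySem.List.pyRange (i+1) (a.length : Int) 1).any (fun j =>
          (Int.gcd (PySem.List.pyGetD a i 0 + g) (PySem.List.pyGetD a j 0 + g) : Int) ≠ 1))) = false)
      ↔ a.Pairwise (fun x y => Int.gcd (x + g) (y + g) = 1) := by
  constructor
  · intro H
    rw [List.pairwise_iff_getElem]
    intro i j hi hj hij
    by_contra hne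
    have ht : ((PySem.List.pyRange 0 (a.length : Int) 1).any (fun i =>
        (PySem.List.pyRange (i+1) (a.length : Int) 1).any (fun j =>
          (Int.gcd (PySem.List.pyGetD a i 0 + g) (PySem.List.pyGetD a j 0 + g) : Int) ≠ 1))) = true := by
      rw [List.any_eq_true]
      refine ⟨(i : Int), ?_, ?_⟩
      · rw [PySem.List.mem_pyRange_one]; constructor <;> omega
      · rw [List.any_eq_true]
        refine ⟨(j : Int), ?_, ?_⟩
        · rw [PySem.List.mem_pyRange_one]; constructor <;> omega
        · simp only [decide_eq_true_eq]
          rw [PySem.List.pyGetD_eq_getElem a 0 (by omega) (by exact_mod_cast hi),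
              PySem.List.pyGetD_eq_getElem a 0 (by omega) (by exact_mod_cast hj)]
          simp only [Int.toNat_natCast]
          exact fun hh => hne (by exact_mod_cast hh)
    rw [H] at ht
    exact Bool.false_ne_true ht
  · intro H
    by_contra hb
    rcases Bool.eq_false_or_eq_true ((PySem.List.pyRange 0 (a.length : Int) 1).any (fun i =>
        (PySem.List.pyRange (i+1) (a.length : Int) 1).any (fun j =>
          (Int.gcd (PySem.List.pyGetD a i 0 + g) (PySem.List.pyGetD a j 0 + g) : Int) ≠ 1))) with hEq | hEq
    swap
    · exact hb hEq
    · rw [List.any_eq_true] at hEq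
      obtain ⟨i, hiMem, hInner⟩ := hEq
      rw [PySem.List.mem_pyRange_one] at hiMem
      rw [List.any_eq_true] at hInner
      obtain ⟨j, hjMem, hj⟩ := hInner
      rw [PySem.List.mem_pyRange_one] at hjMem
      simp only [decide_eq_true_eq] at hj
      rw [PySem.List.pyGetD_eq_getElem a 0 (by omega) (by omega),
          PySem.List.pyGetD_eq_getElem a 0 (by omega) (by omega)] at hj
      rw [List.pairwise_iff_getElem] at H
      exact hj (by exact_mod_cast H i.toNat j.toNat (by omega) (by omega) (by omega))

-- the two gcd-folds compute the same g
theorem pv_gfold (a : List Int) :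
    (PySem.List.pyRange 1 (a.length : Int) 1).foldl
      (fun g i => (Int.gcd g (PySem.List.pyGetD a i 0) : Int)) (PySem.List.pyGetD a 0 0)
    = (a.drop 1).foldl (fun g x => (Int.gcd g x : Int)) (PySem.List.pyGetD a 0 0) := by
  have h := PySem.List.foldl_pyRange_pyGetD' a 0 (fun g x => (Int.gcd g x : Int))
      (PySem.List.pyGetD a 0 0) (a := 1) (by norm_num)
  simpa using h

-- ===== VERDICT (by name: the statement is the Claim_ definition above) =====
theorem can_make_coprime_spec : Claim_equal_can_make_coprime := by
  intro a _ _
  simp only [Spec_can_make_coprime, can_make_coprime, can_make_coprime_alt]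
  rw [pv_gfold]
  set g : Int := (a.drop 1).foldl (fun g x => (Int.gcd g x : Int)) (PySem.List.pyGetD a 0 0) with hg
  by_cases h1 : g = 1
  · simp [h1]
  · simp only [if_neg h1]
    by_cases hp : a.Pairwise (fun x y => Int.gcd (x + g) (y + g) = 1)
    · rw [(pv_any_false_iff a g).2 hp]
      simp only [Bool.false_eq_true, if_false]
      symm
      rw [pvProdScan_yes_iff]
      exact ⟨fun x _ => by simp [Int.gcd], hp⟩
    · have ht := (pv_any_false_iff a g).not.2 hp
      rw [Bool.not_eq_false] at ht
      rw [ht]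
      simp only [if_true]
      rcases pvProdScan_yes_or_no g a 1 with hy | hn
      · exact absurd ((pvProdScan_yes_iff g a 1).1 hy).2 hp
      · exact hn.symm
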